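-- pv_equiv track=rewrite | github.com/aash/factorio-assistant | assistant/actions.py | fuzzy_match
-- ===== SOURCE A (Python) =====
-- def fuzzy_match(query: str, candidates: list[dict], limit: int = 10) -> list[dict]:
--     if not query:
--         return candidates[:limit]
--     q = query.lower()
--     scored = []
--     for c in candidates:
--         name = c["name"].lower()
--         if q in name:
--             score = name.index(q)
--         else:
--             score = len(name) + _levenshtein(q, name)
--         scored.append((score, c))
--     scored.sort(key=lambda x: x[0])
--     return [c for _, c in scored[:limit]]
--
-- def _levenshtein(a: str, b: str) -> int:
--     if len(a) < len(b):
--         return _levenshtein(b, a)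
--     if len(b) == 0:
--         return len(a)
--     prev = list(range(len(b) + 1))
--     for i, ca in enumerate(a):
--         curr = [i + 1]
--         for j, cb in enumerate(b):
--             curr.append(min(
--                 prev[j + 1] + 1,
--                 curr[j] + 1,
--                 prev[j] + (0 if ca == cb else 1),
--             ))
--         prev = curr
--     return prev[-1]
-- ===== SOURCE B (Python) =====
-- def fuzzy_match(query: str, candidates: list[dict], limit: int = 10) -> list[dict]:
--     if not query:
--         return candidates[:limit]
--     q = query.lower()
--     scored = [(_score(q, c["name"].lower()), c) for c in candidates]
--     scored.sort(key=lambda p: p[0])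
--     return [c for _, c in scored[:limit]]
--
-- def _score(q: str, name: str) -> int:
--     i = name.find(q)
--     return i if i >= 0 else len(name) + _edit(q, name)
--
-- def _edit(a: str, b: str) -> int:
--     # top-down memoized recursion over prefix lengths (no length-swap guard)
--     memo = {}
--     def go(i: int, j: int) -> int:
--         if i == 0:
--             return j
--         if j == 0:
--             return i
--         v = memo.get((i, j))
--         if v is None:
--             cost = 0 if a[i - 1] == b[j - 1] else 1
--             v = min(go(i - 1, j) + 1, go(i, j - 1) + 1, go(i - 1, j - 1) + cost)
--             memo[(i, j)] = v
--         return v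
--     return go(len(a), len(b))
-- ===== Notes on version B (the rewrite author's own statement) =====
-- stated objective: alternative
-- what changed: The bottom-up rolling-array Levenshtein with its length-swap guard is replaced by a top-down memoized recursion over prefix indices (guard dropped via symmetry), and the scored list is built by comprehension with a _score helper instead of an append loop.
import Mathlib
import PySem

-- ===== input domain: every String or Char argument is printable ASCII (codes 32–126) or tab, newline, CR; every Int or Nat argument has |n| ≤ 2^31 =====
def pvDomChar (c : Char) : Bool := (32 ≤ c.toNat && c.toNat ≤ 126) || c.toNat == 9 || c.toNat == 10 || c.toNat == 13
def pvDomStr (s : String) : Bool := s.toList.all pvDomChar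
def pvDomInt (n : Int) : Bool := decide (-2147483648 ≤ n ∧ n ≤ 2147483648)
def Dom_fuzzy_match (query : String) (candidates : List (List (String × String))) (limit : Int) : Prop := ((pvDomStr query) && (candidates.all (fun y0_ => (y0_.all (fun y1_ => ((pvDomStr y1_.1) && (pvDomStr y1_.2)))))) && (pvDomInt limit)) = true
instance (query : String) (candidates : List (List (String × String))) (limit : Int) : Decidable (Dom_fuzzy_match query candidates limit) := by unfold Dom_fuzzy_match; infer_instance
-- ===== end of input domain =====

-- B replaces the bottom-up rolling-array Levenshtein (and its length-swap guard) by a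
-- top-down memoized recursion over prefix indices, and builds the scored list by
-- comprehension instead of an append loop (objective: alternative, same cost).


-- ===== PORT A =====
-- A's _levenshtein after the (at most one) length swap: rolling-array DP, row by row.
def levCore (a b : List Char) : Int :=
  if b.length = 0 then (a.length : Int)
  else
    let prev0 : List Int := PySem.List.pyRange 0 ((b.length : Int) + 1) 1   -- list(range(len(b)+1))
    let prev := (PySem.List.enumerate a).foldl (fun prev ica =>
      (PySem.List.enumerate b).foldl (fun curr jcb =>
        curr ++ [min (min (PySem.List.pyGetD prev (jcb.1 + 1) 0 + 1)
                          (PySem.List.pyGetD curr jcb.1 0 + 1))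
                     (PySem.List.pyGetD prev jcb.1 0 + (if ica.2 == jcb.2 then 0 else 1))])
        [ica.1 + 1]) prev0
    PySem.List.pyGetD prev (-1) 0                                          -- prev[-1]

-- _levenshtein: the 'if len(a) < len(b): return _levenshtein(b, a)' guard swaps once, then runs the loop.
def pyLevenshtein (a b : List Char) : Int :=
  if a.length < b.length then levCore b a else levCore a b

def fuzzy_match (query : String) (candidates : List (List (String × String))) (limit : Int) : List (List (String × String)) :=
  if PySem.Str.len query = 0 then PySem.List.slice candidates none (some limit)
  else
    let q := PySem.Str.lower query
    let scored := candidates.foldl (fun scored c =>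
      let name := PySem.Str.lower ((List.lookup "name" c).getD "")  -- c["name"]; Pre_ guarantees the key is present
      let score : Int :=
        if PySem.Str.isIn q name then PySem.Str.find name q          -- name.index(q) = name.find(q), exact since q in name
        else PySem.Str.len name + pyLevenshtein q.toList name.toList
      scored ++ [(score, c)]) []
    (PySem.List.slice (PySem.List.sorted scored (fun x => x.1)) none (some limit)).map (fun p => p.2)

-- ===== PORT B =====
-- Source B's inner go(i, j): top-down recursion over prefix lengths, threading the memo dict.
def editGo (a b : List Char) : Nat → Nat → PySem.Dict (Nat × Nat) Int → Int × PySem.Dict (Nat × Nat) Int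
  | 0, j, m => ((j : Int), m)
  | i+1, 0, m => (((i : Nat) + 1 : Int), m)
  | i+1, j+1, m =>
    match m.get? (i + 1, j + 1) with
    | some v => (v, m)
    | none =>
      let cost : Int := if a.getD i ' ' == b.getD j ' ' then 0 else 1   -- a[i-1] == b[j-1]
      let r1 := editGo a b i (j + 1) m
      let r2 := editGo a b (i + 1) j r1.2
      let r3 := editGo a b i j r2.2
      let v := min (min (r1.1 + 1) (r2.1 + 1)) (r3.1 + cost)
      (v, r3.2.insert (i + 1, j + 1) v)
  termination_by i j _ => (i, j)

def pyEdit (a b : List Char) : Int :=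
  (editGo a b a.length b.length PySem.Dict.empty).1

def scoreB (q name : String) : Int :=
  let i := PySem.Str.find name q
  if 0 ≤ i then i else PySem.Str.len name + pyEdit q.toList name.toList

def fuzzy_match_alt (query : String) (candidates : List (List (String × String))) (limit : Int) : List (List (String × String)) :=
  if PySem.Str.len query = 0 then PySem.List.slice candidates none (some limit)
  else
    let q := PySem.Str.lower query
    let scored := candidates.map (fun c =>
      (scoreB q (PySem.Str.lower ((List.lookup "name" c).getD "")), c))
    (PySem.List.slice (PySem.List.sorted scored (fun p => p.1)) none (some limit)).map (fun p => p.2)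

-- ===== PRECONDITION & SPEC =====
-- Pre_ excludes exactly the inputs on which Python A raises KeyError: a nonempty query
-- together with some candidate dict that has no "name" key.
def Pre_fuzzy_match (query : String) (candidates : List (List (String × String))) (limit : Int) : Prop :=
  query.toList = [] ∨ ∀ c ∈ candidates, (List.lookup "name" c).isSome
instance (query : String) (candidates : List (List (String × String))) (limit : Int) : Decidable (Pre_fuzzy_match query candidates limit) := by unfold Pre_fuzzy_match; infer_instance

def pvWitness_fuzzy_match : String × (List (List (String × String))) × Int :=
  ("ab", [[("name", "cab")], [("name", "x"), ("k", "v")]], 10)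

def Spec_fuzzy_match (query : String) (candidates : List (List (String × String))) (limit : Int) (out : List (List (String × String))) : Prop := out = fuzzy_match_alt query candidates limit
instance (query : String) (candidates : List (List (String × String))) (limit : Int) (out : List (List (String × String))) : Decidable (Spec_fuzzy_match query candidates limit out) := by unfold Spec_fuzzy_match; infer_instance

-- ===== CLAIM (what is proved, stated in full; the proofs are below) =====
def Claim_equal_fuzzy_match : Prop := ∀ (query : String) (candidates : List (List (String × String))) (limit : Int), Dom_fuzzy_match query candidates limit → Pre_fuzzy_match query candidates limit → Spec_fuzzy_match query candidates limit (fuzzy_match query candidates limit)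

-- ===== LEMMAS AND PROOFS =====
-- scratch: appended after CLAIM block
def dpI (a b : List Char) : Nat → Nat → Int
  | 0, j => (j : Int)
  | i+1, 0 => ((i : Nat) + 1 : Int)
  | i+1, j+1 =>
      min (min (dpI a b i (j+1) + 1) (dpI a b (i+1) j + 1))
          (dpI a b i j + (if a.getD i ' ' == b.getD j ' ' then 0 else 1))
  termination_by i j => (i, j)

theorem dpI_zero_left (a b : List Char) (j : Nat) : dpI a b 0 j = (j : Int) := by
  rw [dpI]

theorem dpI_zero_right (a b : List Char) (i : Nat) : dpI a b i 0 = (i : Int) := by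
  cases i
  · rw [dpI]
  · rw [dpI]; push_cast; ring

theorem dpI_succ_succ (a b : List Char) (i j : Nat) :
    dpI a b (i+1) (j+1) =
      min (min (dpI a b i (j+1) + 1) (dpI a b (i+1) j + 1))
          (dpI a b i j + (if a.getD i ' ' == b.getD j ' ' then 0 else 1)) := by
  rw [dpI]

theorem dpI_symm (a b : List Char) (i j : Nat) : dpI a b i j = dpI b a j i := by
  have H : ∀ n i j, i + j ≤ n → dpI a b i j = dpI b a j i := by
    intro n
    induction n with
    | zero => intro i j h
              have hi : i = 0 := by omega
              have hj : j = 0 := by omega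
              subst hi; subst hj; rw [dpI_zero_left, dpI_zero_right]
    | succ n ih =>
      intro i j h
      match i, j with
      | 0, j => rw [dpI_zero_left, dpI_zero_right]
      | i+1, 0 => rw [dpI_zero_left, dpI_zero_right]
      | i+1, j+1 =>
        rw [dpI_succ_succ, dpI_succ_succ]
        rw [ih i (j+1) (by omega), ih (i+1) j (by omega), ih i j (by omega)]
        have hc : (a.getD i ' ' == b.getD j ' ') = (b.getD j ' ' == a.getD i ' ') := by
          simp [eq_comm]
        rw [hc]
        rw [min_comm (dpI b a (j+1) i + 1) (dpI b a j (i+1) + 1)]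
  exact H (i + j) i j le_rfl

-- memo correctness for editGo
def MemoOK (a b : List Char) (m : PySem.Dict (Nat × Nat) Int) : Prop :=
  ∀ i j v, m.get? (i, j) = some v → v = dpI a b i j

theorem editGo_ok (a b : List Char) :
    ∀ (n i j : Nat) (m : PySem.Dict (Nat × Nat) Int), i + j ≤ n → MemoOK a b m →
      (editGo a b i j m).1 = dpI a b i j ∧ MemoOK a b (editGo a b i j m).2 := by
  intro n
  induction n with
  | zero =>
    intro i j m h hm
    have hi : i = 0 := by omega
    subst hi
    constructor
    · simp [editGo, dpI_zero_left]
    · simpa [editGo] using hm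
  | succ n ih =>
    intro i j m h hm
    match i, j with
    | 0, j => exact ⟨by simp [editGo, dpI_zero_left], by simpa [editGo] using hm⟩
    | i+1, 0 => exact ⟨by simp [editGo, dpI_zero_right], by simpa [editGo] using hm⟩
    | i+1, j+1 =>
      rw [editGo]
      cases hg : m.get? (i+1, j+1) with
      | some v =>
        simp only
        exact ⟨hm _ _ _ hg, hm⟩
      | none =>
        simp only
        obtain ⟨h1, hm1⟩ := ih i (j+1) m (by omega) hm
        obtain ⟨h2, hm2⟩ := ih (i+1) j _ (by omega) hm1
        obtain ⟨h3, hm3⟩ := ih i j _ (by omega) hm2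
        refine ⟨?_, ?_⟩
        · rw [h1, h2, h3, dpI_succ_succ]
        · intro p q w hw
          rw [PySem.Dict.get?_insert] at hw
          split at hw
          · rename_i heq
            cases hw
            have : (p, q) = (i+1, j+1) := heq
            cases this
            rw [h1, h2, h3, dpI_succ_succ]
          · exact hm3 _ _ _ hw

theorem pyEdit_eq (a b : List Char) : pyEdit a b = dpI a b a.length b.length := by
  have := editGo_ok a b (a.length + b.length) a.length b.length PySem.Dict.empty le_rfl
    (by intro i j v h; simp [PySem.Dict.get?_empty] at h)
  exact this.1

def rowA (a b : List Char) (i : Nat) : List Int :=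
  (List.range (b.length + 1)).map (fun j => dpI a b i j)

theorem inner_aux (a b : List Char) (i : Nat) (hi : i < a.length) :
    ∀ t, t ≤ b.length →
      (List.take t (PySem.List.enumerate b)).foldl
        (fun curr jcb =>
          curr ++ [min (min (PySem.List.pyGetD (rowA a b i) (jcb.1 + 1) 0 + 1)
                            (PySem.List.pyGetD curr jcb.1 0 + 1))
                       (PySem.List.pyGetD (rowA a b i) jcb.1 0 + (if a[i] == jcb.2 then 0 else 1))])
        [((i : Int) + 1)]
      = (List.range (t + 1)).map (fun j => dpI a b (i + 1) j) := by
  intro t ht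
  induction t with
  | zero =>
    simp [dpI_zero_right]
  | succ t ih =>
    have ht' : t ≤ b.length := by omega
    have hlt : t < (PySem.List.enumerate b (0 : Int)).length := by
      rw [PySem.List.length_enumerate]; omega
    rw [List.take_add_one, List.getElem?_eq_getElem hlt, PySem.List.getElem_enumerate]
    rw [List.foldl_append, ih ht']
    simp only [Option.toList_some, List.foldl_cons, List.foldl_nil, zero_add]
    have e1 : PySem.List.pyGetD (rowA a b i) ((t : Int) + 1) 0 = dpI a b i (t + 1) := by
      have : ((t : Int) + 1) = ((t + 1 : Nat) : Int) := by push_cast; ring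
      rw [this, PySem.List.pyGetD_natCast, rowA, PySem.List.getD_map_range _ _ _ _ (by omega)]
    have e2 : PySem.List.pyGetD ((List.range (t + 1)).map (fun j => dpI a b (i + 1) j)) (t : Int) 0
        = dpI a b (i + 1) t := by
      rw [PySem.List.pyGetD_natCast, PySem.List.getD_map_range _ _ _ _ (by omega)]
    have e3 : PySem.List.pyGetD (rowA a b i) (t : Int) 0 = dpI a b i t := by
      rw [PySem.List.pyGetD_natCast, rowA, PySem.List.getD_map_range _ _ _ _ (by omega)]
    rw [e1, e2, e3]
    have hbt : t < b.length := by omega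
    rw [List.range_succ (n := t + 1), List.map_append]
    congr 1
    simp only [List.map_cons, List.map_nil]
    congr 1
    rw [dpI_succ_succ]
    congr 2
    rw [List.getD_eq_getElem a ' ' hi, List.getD_eq_getElem b ' ' hbt]

theorem outer_aux (a b : List Char) :
    ∀ t, t ≤ a.length →
      (List.take t (PySem.List.enumerate a)).foldl
        (fun prev ica =>
          (PySem.List.enumerate b).foldl
            (fun curr jcb =>
              curr ++ [min (min (PySem.List.pyGetD prev (jcb.1 + 1) 0 + 1)
                                (PySem.List.pyGetD curr jcb.1 0 + 1))
                           (PySem.List.pyGetD prev jcb.1 0 + (if ica.2 == jcb.2 then 0 else 1))])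
            [ica.1 + 1])
        (PySem.List.pyRange 0 ((b.length : Int) + 1) 1)
      = rowA a b t := by
  intro t ht
  induction t with
  | zero =>
    simp only [List.take_zero, List.foldl_nil]
    have hc : ((b.length : Int) + 1) = ((b.length + 1 : Nat) : Int) := by push_cast; ring
    rw [hc, PySem.List.pyRange_zero_natCast, rowA]
    apply List.map_congr_left
    intro j _
    rw [dpI_zero_left]
  | succ t ih =>
    have ht' : t ≤ a.length := by omega
    have hi : t < a.length := by omega
    have hlt : t < (PySem.List.enumerate a (0 : Int)).length := by
      rw [PySem.List.length_enumerate]; omega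
    rw [List.take_add_one, List.getElem?_eq_getElem hlt, PySem.List.getElem_enumerate]
    rw [List.foldl_append, ih ht']
    simp only [Option.toList_some, List.foldl_cons, List.foldl_nil, zero_add]
    have h2 := inner_aux a b t hi b.length le_rfl
    have h3 : List.take b.length (PySem.List.enumerate b) = PySem.List.enumerate b := by
      conv_lhs => rw [show b.length = (PySem.List.enumerate b (0 : Int)).length from
        (PySem.List.length_enumerate b 0).symm]
      exact List.take_length
    rw [h3] at h2
    rw [h2]
    rw [rowA]

theorem levCore_eq (a b : List Char) : levCore a b = dpI a b a.length b.length := by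
  rw [levCore]
  by_cases hb : b.length = 0
  · rw [if_pos hb, hb, dpI_zero_right]
  · rw [if_neg hb]
    simp only
    have h3 : List.take a.length (PySem.List.enumerate a) = PySem.List.enumerate a := by
      conv_lhs => rw [show a.length = (PySem.List.enumerate a (0 : Int)).length from
        (PySem.List.length_enumerate a 0).symm]
      exact List.take_length
    have ho := outer_aux a b a.length le_rfl
    rw [h3] at ho
    rw [ho]
    have hne : rowA a b a.length ≠ [] := by
      rw [rowA]
      simp [List.range_succ]
    rw [PySem.List.pyGetD_neg_one _ _ hne]
    rw [List.getLast_eq_getElem]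
    have hlen : (rowA a b a.length).length = b.length + 1 := by
      rw [rowA]; simp
    simp only [rowA, List.getElem_map, List.length_map, List.length_range,
      Nat.add_sub_cancel, List.getElem_range]

theorem pyLevenshtein_eq (a b : List Char) :
    pyLevenshtein a b = dpI a b a.length b.length := by
  rw [pyLevenshtein]
  by_cases h : a.length < b.length
  · rw [if_pos h, levCore_eq, dpI_symm]
  · rw [if_neg h, levCore_eq]

theorem score_eq (q name : String) :
    (if PySem.Str.isIn q name then PySem.Str.find name q
     else PySem.Str.len name + pyLevenshtein q.toList name.toList) = scoreB q name := by
  rw [scoreB]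
  by_cases h : q.toList <:+: name.toList
  · rw [if_pos ((PySem.Str.isIn_iff_infix q name).mpr h),
        if_pos ((PySem.Str.find_nonneg_iff name q).mpr h)]
  · rw [if_neg (fun hc => h ((PySem.Str.isIn_iff_infix q name).mp hc)),
        if_neg (fun hc => h ((PySem.Str.find_nonneg_iff name q).mp hc))]
    rw [pyLevenshtein_eq, pyEdit_eq]

-- ===== VERDICT (by name: the statement is the Claim_ definition above) =====
theorem fuzzy_match_spec : Claim_equal_fuzzy_match := by
  intro query candidates limit _ _
  have hsc : (candidates.foldl
      (fun scored c =>
        scored ++ [((if PySem.Str.isIn (PySem.Str.lower query)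
                        (PySem.Str.lower ((List.lookup "name" c).getD ""))
                     then PySem.Str.find (PySem.Str.lower ((List.lookup "name" c).getD ""))
                            (PySem.Str.lower query)
                     else PySem.Str.len (PySem.Str.lower ((List.lookup "name" c).getD "")) +
                            pyLevenshtein (PySem.Str.lower query).toList
                              (PySem.Str.lower ((List.lookup "name" c).getD "")).toList), c)])
      ([] : List (Int × List (String × String))))
    = candidates.map (fun c =>
        (scoreB (PySem.Str.lower query) (PySem.Str.lower ((List.lookup "name" c).getD "")), c)) := by
    rw [PySem.List.foldl_append_singleton_eq_map, List.nil_append]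
    apply List.map_congr_left
    intro c _
    rw [score_eq]
  unfold Spec_fuzzy_match
  rw [fuzzy_match, fuzzy_match_alt]
  by_cases hq : PySem.Str.len query = 0
  · rw [if_pos hq, if_pos hq]
  · rw [if_neg hq, if_neg hq]
    dsimp only
    rw [hsc]
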